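-- pv_equiv track=rewrite | github.com/keaganchern/LLMtenspiler | polybench_transpilation/dsl_operators.py | matrix_elemwise_sub
-- ===== SOURCE A (Python) =====
-- from typing import List, Any
--
-- def matrix_elemwise_sub(
--     matrix_x: List[List[int]], matrix_y: List[List[int]]
-- ) -> List[List[int]]:
--     return (
--         []
--         if len(matrix_x) < 1 or not len(matrix_x) == len(matrix_y)
--         else [
--             vec_elemwise_sub(matrix_x[0], matrix_y[0]),
--             *matrix_elemwise_sub(matrix_x[1:], matrix_y[1:]),
--         ]
--     )
--
-- def vec_elemwise_sub(x: List[int], y: List[int]) -> List[int]: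
--     return (
--         []
--         if len(x) < 1 or not len(x) == len(y)
--         else [(x[0] - y[0]), *vec_elemwise_sub(x[1:], y[1:])]
--     )
-- ===== SOURCE B (Python) =====
-- from typing import List
--
-- def matrix_elemwise_sub(
--     matrix_x: List[List[int]], matrix_y: List[List[int]]
-- ) -> List[List[int]]:
--     if len(matrix_x) < 1 or len(matrix_x) != len(matrix_y):
--         return []
--     out = []
--     for x, y in zip(matrix_x, matrix_y):
--         if len(x) < 1 or len(x) != len(y):
--             out.append([])
--         else:
--             out.append([a - b for a, b in zip(x, y)])
--     return out
-- ===== Notes on version B (the rewrite author's own statement) =====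
-- stated objective: idiomatic
-- what changed: Replaced the doubly-recursive slicing implementation (recursion over rows, recursion over elements, each step copying suffixes) by a single guarded pass over zipped rows with an accumulator, the per-row subtraction done by a zip comprehension; no list slicing, so no quadratic copying.
import Mathlib
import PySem

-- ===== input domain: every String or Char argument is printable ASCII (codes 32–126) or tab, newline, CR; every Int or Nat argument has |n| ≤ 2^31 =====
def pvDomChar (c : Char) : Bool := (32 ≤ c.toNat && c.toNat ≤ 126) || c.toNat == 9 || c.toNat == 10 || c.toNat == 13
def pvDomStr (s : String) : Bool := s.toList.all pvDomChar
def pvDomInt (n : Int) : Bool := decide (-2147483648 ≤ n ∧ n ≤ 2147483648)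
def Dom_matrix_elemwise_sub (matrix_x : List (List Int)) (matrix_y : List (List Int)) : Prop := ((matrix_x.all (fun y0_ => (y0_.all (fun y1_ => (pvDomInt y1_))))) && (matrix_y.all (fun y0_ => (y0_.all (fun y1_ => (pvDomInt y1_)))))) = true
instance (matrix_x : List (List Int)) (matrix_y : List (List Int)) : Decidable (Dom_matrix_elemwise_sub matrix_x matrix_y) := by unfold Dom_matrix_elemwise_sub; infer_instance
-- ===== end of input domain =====

-- B replaces A's doubly-recursive, slice-copying implementation by one guarded pass over
-- zipped rows with an accumulator (idiomatic; avoids repeated suffix copies).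

-- ===== PORT A =====
-- vec_elemwise_sub: x[0], y[0] are heads (guard ensures nonempty), x[1:] is the tail.
def pv_vec_elemwise_sub (x : List Int) (y : List Int) : List Int :=
  if x.length < 1 ∨ ¬ x.length = y.length then []
  else (x.headI - y.headI) :: pv_vec_elemwise_sub x.tail y.tail
termination_by x.length
decreasing_by
  simp only [not_or, not_lt] at *
  cases x <;> simp_all <;> omega

def matrix_elemwise_sub (matrix_x : List (List Int)) (matrix_y : List (List Int)) : List (List Int) :=
  if matrix_x.length < 1 ∨ ¬ matrix_x.length = matrix_y.length then []
  else pv_vec_elemwise_sub matrix_x.headI matrix_y.headI ::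
       matrix_elemwise_sub matrix_x.tail matrix_y.tail
termination_by matrix_x.length
decreasing_by
  simp only [not_or, not_lt] at *
  cases matrix_x <;> simp_all <;> omega

-- ===== PORT B =====
def matrix_elemwise_sub_alt (matrix_x : List (List Int)) (matrix_y : List (List Int)) : List (List Int) :=
  if matrix_x.length < 1 ∨ matrix_x.length ≠ matrix_y.length then []
  else
    (matrix_x.zip matrix_y).foldl
      (fun out p =>
        out ++ [if p.1.length < 1 ∨ p.1.length ≠ p.2.length then []
                else (p.1.zip p.2).map (fun q => q.1 - q.2)])
      []

-- ===== PRECONDITION & SPEC =====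
def Spec_matrix_elemwise_sub (matrix_x : List (List Int)) (matrix_y : List (List Int)) (out : List (List Int)) : Prop := out = matrix_elemwise_sub_alt matrix_x matrix_y
instance (matrix_x : List (List Int)) (matrix_y : List (List Int)) (out : List (List Int)) : Decidable (Spec_matrix_elemwise_sub matrix_x matrix_y out) := by unfold Spec_matrix_elemwise_sub; infer_instance

-- ===== CLAIM (what is proved, stated in full; the proofs are below) =====
def Claim_equal_matrix_elemwise_sub : Prop := ∀ (matrix_x : List (List Int)) (matrix_y : List (List Int)), Dom_matrix_elemwise_sub matrix_x matrix_y → Spec_matrix_elemwise_sub matrix_x matrix_y (matrix_elemwise_sub matrix_x matrix_y)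

-- ===== LEMMAS AND PROOFS =====

def pvRow (p : List Int × List Int) : List Int :=
  if p.1.length < 1 ∨ p.1.length ≠ p.2.length then []
  else (p.1.zip p.2).map (fun q => q.1 - q.2)

theorem pv_vec_closed (x y : List Int) :
    pv_vec_elemwise_sub x y = pvRow (x, y) := by
  induction x generalizing y with
  | nil => rw [pv_vec_elemwise_sub]; simp [pvRow]
  | cons a xs ih =>
    cases y with
    | nil => rw [pv_vec_elemwise_sub]; simp [pvRow]
    | cons b ys =>
      rw [pv_vec_elemwise_sub]
      by_cases h : xs.length = ys.length
      · simp only [pvRow, List.length_cons, h]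
        simp [ih ys, pvRow, h]
        cases xs <;> cases ys <;> simp_all
      · simp [pvRow, h]

theorem pv_foldl_append {α β : Type} (g : α → List β) (l : List α) (acc : List (List β)) :
    l.foldl (fun out p => out ++ [g p]) acc = acc ++ l.map g := by
  induction l generalizing acc with
  | nil => simp
  | cons a t ih => simp [List.foldl_cons, ih, List.append_assoc]

theorem pv_matA_closed (mx my : List (List Int)) :
    matrix_elemwise_sub mx my =
      if mx.length < 1 ∨ mx.length ≠ my.length then [] else (mx.zip my).map pvRow := by
  induction mx generalizing my with
  | nil => rw [matrix_elemwise_sub]; simp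
  | cons a xs ih =>
    cases my with
    | nil => rw [matrix_elemwise_sub]; simp
    | cons b ys =>
      rw [matrix_elemwise_sub]
      by_cases h : xs.length = ys.length
      · simp only [List.length_cons, h]
        simp [ih ys, h, pv_vec_closed]
        tauto
      · simp [h]

-- ===== VERDICT (by name: the statement is the Claim_ definition above) =====
theorem matrix_elemwise_sub_spec : Claim_equal_matrix_elemwise_sub := by
  intro mx my _
  unfold Spec_matrix_elemwise_sub matrix_elemwise_sub_alt
  rw [pv_matA_closed]
  split_ifs with h
  · rfl
  · rw [pv_foldl_append (fun p : List Int × List Int =>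
        if p.1.length < 1 ∨ p.1.length ≠ p.2.length then []
        else (p.1.zip p.2).map (fun q => q.1 - q.2))]
    simp only [List.nil_append]
    rfl
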